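-- pv_equiv track=rewrite | github.com/Melv1nS/CS313E_Projects | Assignments/Assignment 13/MagicSquares.py | convert_2D
-- ===== SOURCE A (Python) =====
-- import math
--
-- def convert_2D(a):
--   n = math.sqrt(len(a))
--
--   a_2D = []
--   temp = []
--
--   for num in a:
--     temp.append(num)
--     if len(temp) == 3:
--       a_2D.append(temp)
--       temp = []
--
--   return a_2D
-- ===== SOURCE B (Python) =====
-- def convert_2D(a):
--     # Stride over indices in steps of 3 and slice each full chunk;
--     # the incomplete trailing group (fewer than 3) falls outside m, as in A.
--     m = len(a) - len(a) % 3
--     return [a[i:i+3] for i in range(0, m, 3)]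
-- ===== Notes on version B (the rewrite author's own statement) =====
-- stated objective: simpler
-- what changed: Replaces the element-by-element accumulate-and-flush loop with a temp buffer by a stride-by-3 index comprehension that slices each full chunk directly (and ignores A's unused math.sqrt).
import Mathlib
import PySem

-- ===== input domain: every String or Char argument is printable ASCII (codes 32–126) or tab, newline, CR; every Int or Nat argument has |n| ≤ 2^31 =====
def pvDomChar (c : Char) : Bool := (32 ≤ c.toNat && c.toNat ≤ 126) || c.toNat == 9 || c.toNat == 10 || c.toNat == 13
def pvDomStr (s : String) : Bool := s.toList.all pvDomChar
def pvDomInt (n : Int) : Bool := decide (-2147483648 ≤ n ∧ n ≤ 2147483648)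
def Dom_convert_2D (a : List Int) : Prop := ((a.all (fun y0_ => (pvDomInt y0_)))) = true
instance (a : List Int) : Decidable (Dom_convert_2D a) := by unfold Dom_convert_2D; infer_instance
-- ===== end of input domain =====

-- B replaces A's accumulate-and-flush temp-buffer loop by a stride-by-3 slicing comprehension; objective: simpler.


-- ===== PORT A =====
-- A's 'n = math.sqrt(len(a))' is computed and never used; it cannot affect the result and is omitted.
def pvStepA (st : List (List Int) × List Int) (num : Int) : List (List Int) × List Int :=
  let temp := st.2 ++ [num]
  if temp.length == 3 then (st.1 ++ [temp], []) else (st.1, temp)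

def convert_2D (a : List Int) : List (List Int) :=
  (a.foldl pvStepA ([], [])).1

-- ===== PORT B =====
def convert_2D_alt (a : List Int) : List (List Int) :=
  let m : Int := (a.length : Int) - PySem.Int.mod (a.length : Int) 3
  (PySem.List.pyRange 0 m 3).map (fun i => PySem.List.slice a (some i) (some (i + 3)))

-- ===== PRECONDITION & SPEC =====
def Spec_convert_2D (a : List Int) (out : List (List Int)) : Prop := out = convert_2D_alt a
instance (a : List Int) (out : List (List Int)) : Decidable (Spec_convert_2D a out) := by unfold Spec_convert_2D; infer_instance

-- ===== CLAIM (what is proved, stated in full; the proofs are below) =====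
def Claim_equal_convert_2D : Prop := ∀ (a : List Int), Dom_convert_2D a → Spec_convert_2D a (convert_2D a)

-- ===== LEMMAS AND PROOFS =====
-- common characterisation: the list chunked into full groups of three
def chunk3 : List Int → List (List Int)
  | x :: y :: z :: r => [x, y, z] :: chunk3 r
  | _ => []

theorem loopA (a : List Int) (acc : List (List Int)) :
    (a.foldl pvStepA (acc, [])).1 = acc ++ chunk3 a := by
  match a with
  | [] => simp [chunk3]
  | [x] => simp [pvStepA, chunk3]
  | [x, y] => simp [pvStepA, chunk3]
  | x :: y :: z :: rest =>
    have ih := loopA rest (acc ++ [[x, y, z]])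
    simp only [List.foldl, pvStepA] at ih ⊢
    simp at ih ⊢
    rw [ih, chunk3]
termination_by a.length

theorem chunk3_eq (l : List Int) :
    (List.range (l.length / 3)).map (fun k => (l.drop (3 * k)).take 3) = chunk3 l := by
  match l with
  | [] => simp [chunk3]
  | [x] => simp [chunk3]
  | [x, y] => simp [chunk3]
  | x :: y :: z :: r =>
    have ih := chunk3_eq r
    have hlen : (x :: y :: z :: r).length / 3 = r.length / 3 + 1 := by simp; omega
    rw [chunk3, hlen, List.range_succ_eq_map]
    simp only [List.map_cons, List.map_map]
    refine congrArg₂ _ (by simp) ?_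
    rw [← ih]
    refine List.map_congr_left (fun k _ => ?_)
    have h3 : 3 * Nat.succ k = 3 + 3 * k := by omega
    simp only [Function.comp, h3, ← List.drop_drop]
    rfl
termination_by l.length

theorem altB (a : List Int) :
    convert_2D_alt a = (List.range (a.length / 3)).map (fun k => (a.drop (3 * k)).take 3) := by
  rw [show convert_2D_alt a = (PySem.List.pyRange 0 ((a.length : Int) - PySem.Int.mod (a.length : Int) 3) 3).map
      (fun i => PySem.List.slice a (some i) (some (i + 3))) from rfl]
  have hm : (a.length : Int) - PySem.Int.mod (a.length : Int) 3 = ((3 * (a.length / 3) : Nat) : Int) := by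
    simp only [PySem.Int.mod]
    rw [Int.fmod_eq_emod]
    simp
    omega
  rw [hm, PySem.List.pyRange_of_pos 0 _ (by norm_num)]
  have hK : (if (0:Int) < ((3 * (a.length / 3) : Nat) : Int) then
      ((((3 * (a.length / 3) : Nat) : Int) - 0 + 3 - 1) / 3).toNat else 0) = a.length / 3 := by
    split_ifs with h <;> omega
  rw [hK, List.map_map]
  refine List.map_congr_left (fun k _ => ?_)
  have h1 : (0 : Int) + 3 * (k : Int) = ((3 * k : Nat) : Int) := by push_cast; ring
  simp only [Function.comp, h1]
  have h3 : ((3 * k : Nat) : Int) + 3 = ((3 * k + 3 : Nat) : Int) := by push_cast; ring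
  rw [h3, PySem.List.slice_natCast]
  congr 1
  omega

-- ===== VERDICT (by name: the statement is the Claim_ definition above) =====
theorem convert_2D_spec : Claim_equal_convert_2D := by
  intro a _
  unfold Spec_convert_2D convert_2D
  rw [altB, chunk3_eq]
  simpa using loopA a []
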